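-- pv_equiv track=rewrite | github.com/alanlou/leetcode-patterns | python/_1649.py | createSortedArray
-- ===== SOURCE A (Python) =====
-- from typing import List
--
-- class FenwickTree:
--     def __init__(self, n):
--         self.sums = [0] * (n + 1)
--
--     def update(self, i, delta):
--         while i < len(self.sums):
--             self.sums[i] += delta
--             i += self._lowbit(i)
--
--     def query(self, i):
--         s = 0
--         while i > 0:
--             s += self.sums[i]
--             i -= self._lowbit(i)
--         return s
--
--     def _lowbit(self, x):
--         return x & -x
--
-- def createSortedArray(instructions: List[int]) -> int:
--     ans, MOD = 0, 10**9 + 7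
--     fw_tree = FenwickTree(max(instructions))
--
--     for i, num in enumerate(instructions):
--         left = fw_tree.query(num - 1)
--         right = i - fw_tree.query(num)
--         ans = (ans + min(left, right)) % MOD
--         fw_tree.update(num, 1)
--
--     return ans
-- ===== SOURCE B (Python) =====
-- import bisect
--
-- def createSortedArray(instructions):
--     MOD = 10 ** 9 + 7
--     ans = 0
--     vals = []  # kept sorted
--     for num in instructions:
--         left = bisect.bisect_left(vals, num)
--         right = len(vals) - bisect.bisect_right(vals, num)
--         ans = (ans + min(left, right)) % MOD
--         bisect.insort(vals, num)
--     return ans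
-- ===== Notes on version B (the rewrite author's own statement) =====
-- stated objective: idiomatic
-- what changed: Replaces the hand-rolled Fenwick tree (an O(max(instructions))-sized array of partial counts with bit-trick update/query loops) by a sorted list maintained with the standard bisect module: left/right costs come from bisect_left/bisect_right and insertion from insort.
-- outside the precondition, e.g. on createSortedArray([]): A raises ValueError, B returns 0; on createSortedArray([0]): A does not finish within the time limit, B returns 0
import Mathlib
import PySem

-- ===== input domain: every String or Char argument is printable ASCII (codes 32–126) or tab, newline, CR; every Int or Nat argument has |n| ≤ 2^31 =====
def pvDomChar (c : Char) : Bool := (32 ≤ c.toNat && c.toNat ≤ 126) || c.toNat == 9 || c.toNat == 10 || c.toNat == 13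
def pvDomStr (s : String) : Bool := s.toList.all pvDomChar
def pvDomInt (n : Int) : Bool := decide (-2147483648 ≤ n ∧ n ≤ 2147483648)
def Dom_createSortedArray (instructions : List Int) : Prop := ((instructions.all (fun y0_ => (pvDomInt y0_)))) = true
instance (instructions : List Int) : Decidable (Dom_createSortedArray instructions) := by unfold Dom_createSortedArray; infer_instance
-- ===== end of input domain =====

-- B replaces A's hand-rolled Fenwick tree (array of size max(instructions) with bit-trick loops)
-- by a sorted list queried with binary-search counts (Python: the bisect module); return values agree on Pre_.

-- ===== PORT A =====

-- Python's x & -x (exact, incl. negatives, via PySem.Int.band)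
def pyLowbit (x : Int) : Int := PySem.Int.band x (-x)

-- FenwickTree.update: 'while i < len(sums): sums[i] += delta; i += lowbit(i)'.
-- pySetD/pyGetD are Python-exact (negative indices wrap). fuel = len(sums) is totality
-- only: inside Pre_ (i ≥ 1) the loop makes at most len(sums) - i steps, so fuel never runs out;
-- Python diverges for i ≤ 0, which Pre_ excludes.
def fwUpdate (fuel : Nat) (sums : List Int) (i delta : Int) : List Int :=
  match fuel with
  | 0 => sums
  | fuel + 1 =>
    if i < (sums.length : Int) then
      fwUpdate fuel (PySem.List.pySetD sums i (PySem.List.pyGetD sums i 0 + delta)) (i + pyLowbit i) delta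
    else sums

-- FenwickTree.query: 'while i > 0: s += sums[i]; i -= lowbit(i)'. fuel = i.toNat + 1 is
-- totality only (i decreases by lowbit(i) ≥ 1 each step). pyGetD is exact inside Pre_,
-- where 0 < i < len(sums) always holds at the read (Python would raise IndexError above).
def fwQuery (fuel : Nat) (sums : List Int) (i s : Int) : Int :=
  match fuel with
  | 0 => s
  | fuel + 1 =>
    if 0 < i then fwQuery fuel sums (i - pyLowbit i) (s + PySem.List.pyGetD sums i 0) else s

-- loop body of A: state (fw_tree.sums, ans), element (i, num) from enumerate(instructions)
def stepA (st : List Int × Int) (p : Int × Int) : List Int × Int :=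
  let left := fwQuery ((p.2 - 1).toNat + 1) st.1 (p.2 - 1) 0
  let right := p.1 - fwQuery (p.2.toNat + 1) st.1 p.2 0
  (fwUpdate st.1.length st.1 p.2 1, (st.2 + min left right) % (10 ^ 9 + 7))

def createSortedArray (instructions : List Int) : Int :=
  -- max(instructions): Python raises ValueError on []; Pre_ excludes it, the port totalises with .getD 0
  let n : Int := (PySem.List.max? instructions (fun x => x)).getD 0
  -- FenwickTree(n): sums = [0] * (n + 1)  (Python gives [] for n + 1 ≤ 0, as .toNat does)
  ((PySem.List.enumerate instructions).foldl stepA (List.replicate (n + 1).toNat 0, 0)).2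

-- ===== PORT B =====

-- loop body of B: vals is the sorted list; bisect_left vals num = #{v ∈ vals | v < num},
-- bisect_right vals num = #{v ∈ vals | v ≤ num} (the bisect contract on a sorted list),
-- bisect.insort = List.orderedInsert (· ≤ ·) — the corresponding Lean functions.
def stepB (st : List Int × Int) (num : Int) : List Int × Int :=
  let left : Int := (st.1.countP (fun v => decide (v < num)) : Nat)
  let right : Int := (st.1.length : Int) - (st.1.countP (fun v => decide (v ≤ num)) : Nat)
  (st.1.orderedInsert (· ≤ ·) num, (st.2 + min left right) % (10 ^ 9 + 7))

def createSortedArray_alt (instructions : List Int) : Int :=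
  (instructions.foldl stepB ([], 0)).2

-- ===== PRECONDITION & SPEC =====
-- Exactly the inputs on which the Python A returns: on [] max() raises ValueError, and on any
-- input containing a value ≤ 0 the Fenwick update loop 'i += i & -i' never terminates.
def Pre_createSortedArray (instructions : List Int) : Prop :=
  instructions ≠ [] ∧ ∀ x ∈ instructions, 1 ≤ x

instance (instructions : List Int) : Decidable (Pre_createSortedArray instructions) := by
  unfold Pre_createSortedArray; infer_instance

def pvWitness_createSortedArray : List Int := [1, 5, 6, 2]

def Spec_createSortedArray (instructions : List Int) (out : Int) : Prop := out = createSortedArray_alt instructions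
instance (instructions : List Int) (out : Int) : Decidable (Spec_createSortedArray instructions out) := by unfold Spec_createSortedArray; infer_instance

-- ===== CLAIM (what is proved, stated in full; the proofs are below) =====
def Claim_equal_createSortedArray : Prop := ∀ (instructions : List Int), Dom_createSortedArray instructions → Pre_createSortedArray instructions → Spec_createSortedArray instructions (createSortedArray instructions)

-- ===== LEMMAS AND PROOFS =====

-- lowest set bit of a natural number, by parity recursion
def lbN : Nat → Nat
  | 0 => 0
  | n + 1 => if (n + 1) % 2 = 1 then 1 else 2 * lbN ((n + 1) / 2)
decreasing_by omega

lemma lbN_odd (n : Nat) (h : n % 2 = 1) : lbN n = 1 := by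
  cases n with
  | zero => omega
  | succ m => rw [lbN, if_pos h]

lemma lbN_even (n : Nat) (h0 : n ≠ 0) (h : n % 2 = 0) : lbN n = 2 * lbN (n / 2) := by
  cases n with
  | zero => omega
  | succ m => rw [lbN, if_neg (by omega)]

lemma lbN_two_pow_mul (a m : Nat) (hm : m % 2 = 1) : lbN (2 ^ a * m) = 2 ^ a := by
  induction a with
  | zero => simpa using lbN_odd m hm
  | succ b ih =>
      have hm0 : m ≠ 0 := by omega
      have h0 : 2 ^ (b + 1) * m ≠ 0 := Nat.mul_ne_zero (by positivity) hm0
      have he : (2 ^ (b + 1) * m) % 2 = 0 := by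
        have : 2 ∣ 2 ^ (b + 1) * m := ⟨2 ^ b * m, by ring⟩
        omega
      have hd : (2 ^ (b + 1) * m) / 2 = 2 ^ b * m := by
        have h2 : 2 ^ (b + 1) * m = 2 * (2 ^ b * m) := by ring
        rw [h2, Nat.mul_div_cancel_left _ (by norm_num)]
      rw [lbN_even _ h0 he, hd, ih, pow_succ]; ring

lemma lbN_spec (n : Nat) (h : n ≠ 0) : ∃ a m, m % 2 = 1 ∧ n = 2 ^ a * m ∧ lbN n = 2 ^ a := by
  obtain ⟨a, m, hm, rfl⟩ := Nat.exists_eq_pow_mul_and_not_dvd h 2 (by norm_num)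
  exact ⟨a, m, by omega, rfl, lbN_two_pow_mul a m (by omega)⟩

lemma lbN_pos (n : Nat) (h : n ≠ 0) : 0 < lbN n := by
  obtain ⟨a, m, hm, hn, hl⟩ := lbN_spec n h
  rw [hl]; positivity

lemma lbN_le (n : Nat) (h : n ≠ 0) : lbN n ≤ n := by
  obtain ⟨a, m, hm, hn, hl⟩ := lbN_spec n h
  rw [hl, hn]
  exact Nat.le_mul_of_pos_right _ (by omega)

lemma lbN_double_le (n : Nat) (h : n ≠ 0) : 2 * lbN n ≤ lbN (n + lbN n) := by
  obtain ⟨a, m, hm, hn, hl⟩ := lbN_spec n h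
  have hme : (m + 1) % 2 = 0 := by omega
  have hm1 : m + 1 ≠ 0 := by omega
  obtain ⟨c, r, hr, hmr, _⟩ := lbN_spec ((m + 1) / 2) (by omega)
  have hsum : n + lbN n = 2 ^ (a + 1 + c) * r := by
    rw [hl, hn]
    have : m + 1 = 2 * ((m + 1) / 2) := by omega
    calc 2 ^ a * m + 2 ^ a = 2 ^ a * (m + 1) := by ring
    _ = 2 ^ a * (2 * ((m + 1) / 2)) := by rw [← this]
    _ = 2 ^ (a + 1 + c) * r := by rw [hmr]; ring
  rw [hsum, lbN_two_pow_mul _ _ hr, hl]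
  calc 2 * 2 ^ a = 2 ^ (a + 1) := by ring
  _ ≤ 2 ^ (a + 1 + c) := Nat.pow_le_pow_right (by norm_num) (by omega)

lemma land_bit (a b : Bool) (m n : Nat) :
    (Nat.bit a m) &&& (Nat.bit b n) = Nat.bit (a && b) (m &&& n) := by
  show Nat.land _ _ = _
  unfold Nat.land
  exact Nat.bitwise_bit (f := and) rfl a m b n

lemma land_ee (q r : Nat) : (2 * q) &&& (2 * r + 1) = 2 * (q &&& r) := by
  simpa [Nat.bit_false, Nat.bit_true] using land_bit false true q r

lemma land_oe (q r : Nat) : (2 * q + 1) &&& (2 * r) = 2 * (q &&& r) := by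
  simpa [Nat.bit_false, Nat.bit_true] using land_bit true false q r

lemma land_pred (n : Nat) (h : n ≠ 0) : n &&& (n - 1) = n - lbN n := by
  induction n using Nat.strong_induction_on with
  | _ n ih =>
    rcases Nat.even_or_odd n with he | ho
    · -- n even, n = 2q with q ≥ 1
      have h2 : n % 2 = 0 := Nat.even_iff.mp he
      obtain ⟨q, rfl⟩ : ∃ q, n = 2 * q := ⟨n / 2, by omega⟩
      have hq : q ≠ 0 := by omega
      have hb2 : 2 * q - 1 = 2 * (q - 1) + 1 := by omega
      rw [hb2, land_ee, ih q (by omega) hq, lbN_even (2 * q) h h2,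
        Nat.mul_div_cancel_left _ (by norm_num)]
      have hle := lbN_le q hq
      have hpos := lbN_pos q hq
      omega
    · -- n odd, n = 2q+1
      have h2 : n % 2 = 1 := Nat.odd_iff.mp ho
      obtain ⟨q, rfl⟩ : ∃ q, n = 2 * q + 1 := ⟨n / 2, by omega⟩
      have hb2 : 2 * q + 1 - 1 = 2 * q := by omega
      rw [hb2, land_oe, Nat.and_self, lbN_odd _ h2]
      omega

lemma pyLowbit_natCast (k : Nat) (h : k ≠ 0) : pyLowbit (k : Int) = (lbN k : Int) := by
  have h1 : ¬ (0 : Int) ≤ -(k : Int) := by omega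
  have h2 : (0 : Int) ≤ (k : Int) := by positivity
  unfold pyLowbit
  rw [PySem.Int.band]
  rw [if_pos h2, if_neg h1]
  have h3 : (-(-(k : Int)) - 1).toNat = k - 1 := by omega
  have h4 : (k : Int).toNat = k := by omega
  rw [h3, h4, land_pred k h]
  have := lbN_le k h
  omega

-- the set of Fenwick cells touched by update(num, ·)
inductive FwChain (num : Nat) : Nat → Prop
  | base : FwChain num num
  | step {p : Nat} : FwChain num p → FwChain num (p + lbN p)

lemma chain_sound (num j : Nat) (hnum : num ≠ 0) (hc : FwChain num j) :
    num ≤ j ∧ j - lbN j < num := by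
  induction hc with
  | base => exact ⟨le_refl _, by have := lbN_pos num hnum; omega⟩
  | @step p hp ihp =>
      have hpne : p ≠ 0 := by omega
      have d := lbN_double_le p hpne
      have l1 := lbN_pos p hpne
      exact ⟨by omega, by omega⟩

lemma chain_complete (num : Nat) (hnum : num ≠ 0) :
    ∀ j, num ≤ j → j - lbN j < num → FwChain num j := by
  intro j
  induction j using Nat.strong_induction_on with
  | _ j ih =>
    intro hle hlt
    rcases eq_or_lt_of_le hle with rfl | hltj
    · exact FwChain.base
    · have hj : j ≠ 0 := by omega
      obtain ⟨a, m, hm, hn, hl⟩ := lbN_spec j hj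
      have hlble := lbN_le j hj
      have hd1 : 1 ≤ j - num := by omega
      have hd2 : j - num < 2 ^ a := by omega
      set d := j - num with hd
      set b := Nat.log 2 d with hb
      have hb1 : 2 ^ b ≤ d := Nat.pow_log_le_self 2 (by omega)
      have hb2 : d < 2 ^ (b + 1) := Nat.lt_pow_succ_log_self (by norm_num) d
      have hba : b < a := by
        by_contra hc
        have : 2 ^ a ≤ 2 ^ b := Nat.pow_le_pow_right (by norm_num) (by omega)
        omega
      set p := j - 2 ^ b with hp
      have hpowle : 2 ^ (b + 1) ≤ 2 ^ a := Nat.pow_le_pow_right (by norm_num) (by omega)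
      have hjform : 2 ^ b * (2 ^ (a - b) * m) = j := by
        rw [hn, ← mul_assoc, ← pow_add]
        congr 2
        omega
      have htodd : (2 ^ (a - b) * m - 1) % 2 = 1 := by
        have h2 : 2 ∣ 2 ^ (a - b) := dvd_pow_self 2 (by omega)
        have : 2 ∣ 2 ^ (a - b) * m := h2.mul_right m
        have hpos : 1 ≤ 2 ^ (a - b) * m :=
          Nat.one_le_iff_ne_zero.mpr (Nat.mul_ne_zero (by positivity) (by omega))
        omega
      have hpform : p = 2 ^ b * (2 ^ (a - b) * m - 1) := by
        rw [hp, Nat.mul_sub, mul_one, hjform]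
      have hlbp : lbN p = 2 ^ b := by rw [hpform]; exact lbN_two_pow_mul _ _ htodd
      have hplt : p < j := by
        have : 0 < 2 ^ b := by positivity
        omega
      have hchain : FwChain num p := by
        apply ih p hplt
        · omega
        · rw [hlbp]
          have : 2 ^ (b + 1) = 2 ^ b + 2 ^ b := by ring
          omega
      have : j = p + lbN p := by
        rw [hlbp]
        omega
      rw [this]
      exact FwChain.step hchain

-- decidable characterisation of the chain
lemma chain_iff (num j : Nat) (hnum : num ≠ 0) :
    FwChain num j ↔ (num ≤ j ∧ j - lbN j < num) :=
  ⟨chain_sound num j hnum, fun ⟨h1, h2⟩ => chain_complete num hnum j h1 h2⟩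

lemma chain_tail (i j : Nat) (hi : i ≠ 0) :
    ((i ≤ j ∧ j - lbN j < i) ∧ j ≠ i) ↔ ((i + lbN i) ≤ j ∧ j - lbN j < i + lbN i) := by
  have hi' : i + lbN i ≠ 0 := by omega
  rw [← chain_iff i j hi, ← chain_iff (i + lbN i) j hi']
  constructor
  · rintro ⟨hc, hne⟩
    induction hc with
    | base => omega
    | @step p hp ihp =>
        rcases eq_or_ne p i with rfl | hpi
        · exact FwChain.base
        · exact FwChain.step (ihp hpi)
  · intro hc
    have hge := (chain_sound _ _ hi' hc).1
    have hlb := lbN_pos i hi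
    constructor
    · induction hc with
      | base => exact FwChain.step FwChain.base
      | @step p hp ihp => exact FwChain.step (ihp (chain_sound _ _ hi' hp).1)
    · omega

lemma fwUpdate_length (fuel : Nat) (sums : List Int) (i delta : Int) :
    (fwUpdate fuel sums i delta).length = sums.length := by
  induction fuel generalizing sums i with
  | zero => rfl
  | succ f ih =>
      rw [fwUpdate]
      split
      · rw [ih, PySem.List.length_pySetD]
      · rfl

lemma fwUpdate_getD (delta : Int) :
    ∀ (fuel : Nat) (sums : List Int) (i : Nat), i ≠ 0 → sums.length ≤ i + fuel →
    ∀ j : Nat, j < sums.length →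
    (fwUpdate fuel sums (i : Int) delta).getD j 0 =
      sums.getD j 0 + (if i ≤ j ∧ j - lbN j < i then delta else 0) := by
  intro fuel
  induction fuel with
  | zero =>
      intro sums i hi hlen j hj
      rw [fwUpdate, if_neg (by omega)]
      omega
  | succ f ih =>
      intro sums i hi hlen j hj
      rw [fwUpdate]
      by_cases hc : (i : Int) < (sums.length : Int)
      · rw [if_pos hc]
        have hilen : i < sums.length := by exact_mod_cast hc
        rw [PySem.List.pyGetD_natCast, PySem.List.pySetD_natCast, pyLowbit_natCast i hi]
        have hlb := lbN_pos i hi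
        have hcast : (i : Int) + (lbN i : Int) = ((i + lbN i : Nat) : Int) := by push_cast; ring
        rw [hcast]
        have hlen1 : (sums.set i (sums.getD i 0 + delta)).length = sums.length := by
          rw [List.length_set]
        rw [ih _ (i + lbN i) (by omega) (by omega) j (by omega)]
        have hget : ∀ v : Int, (sums.set i v).getD j 0 = if j = i then v else sums.getD j 0 := by
          intro v
          rcases eq_or_ne j i with rfl | hne
          · simp [List.getD_eq_getElem?_getD, hilen]
          · simp [List.getD_eq_getElem?_getD, hne, Ne.symm hne]
        rw [hget]
        have htail := chain_tail i j hi
        rcases eq_or_ne j i with rfl | hne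
        · have h1 : j ≤ j ∧ j - lbN j < j := ⟨le_refl _, by have := lbN_pos j hi; omega⟩
          have h2 : ¬ ((j + lbN j) ≤ j ∧ j - lbN j < j + lbN j) := by
            intro hcon; omega
          rw [if_pos rfl, if_neg h2, if_pos h1]
          ring
        · rw [if_neg hne]
          have : ((i + lbN i) ≤ j ∧ j - lbN j < i + lbN i) ↔ (i ≤ j ∧ j - lbN j < i) := by
            rw [← htail]
            constructor
            · rintro ⟨h1, _⟩; exact h1
            · intro h1; exact ⟨h1, hne⟩
          by_cases hcond : i ≤ j ∧ j - lbN j < i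
          · rw [if_pos hcond, if_pos (this.mpr hcond)]
          · rw [if_neg hcond, if_neg (fun hx => hcond (this.mp hx))]
      · rw [if_neg hc]
        have : ¬ (i ≤ j ∧ j - lbN j < i) := by
          have : (sums.length : Int) ≤ (i : Int) := by omega
          omega
        rw [if_neg this]
        omega

-- the Fenwick invariant: cell j stores the count of inserted values in (j - lbN j, j]
def GoodT (n : Nat) (ys : List Int) (sums : List Int) : Prop :=
  sums.length = n + 1 ∧
  ∀ j : Nat, j ≠ 0 → j ≤ n →
    sums.getD j 0 = ((ys.countP (fun v => decide (((j - lbN j : Nat) : Int) < v ∧ v ≤ (j : Int)))) : Nat)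

lemma countP_or_split {α : Type} (l : List α) (f g h : α → Bool)
    (H : ∀ x ∈ l, f x = (g x || h x) ∧ ¬(g x = true ∧ h x = true)) :
    l.countP f = l.countP g + l.countP h := by
  induction l with
  | nil => simp
  | cons x xs ih =>
      have hx := H x (by simp)
      rw [List.countP_cons, List.countP_cons, List.countP_cons,
        ih (fun y hy => H y (List.mem_cons_of_mem x hy))]
      obtain ⟨hfx, hno⟩ := hx
      rcases hgx : g x with _ | _ <;> rcases hhx : h x with _ | _ <;>
        rw [hgx, hhx] at hfx hno <;> simp at hfx hno <;>
        simp [hfx] <;> omega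

lemma query_spec (n : Nat) (ys sums : List Int) (hys : ∀ v ∈ ys, 1 ≤ v)
    (hg : GoodT n ys sums) :
    ∀ k : Nat, k ≤ n → ∀ (fuel : Nat) (s : Int), k < fuel →
    fwQuery fuel sums (k : Int) s = s + ((ys.countP (fun v => decide (v ≤ (k : Int)))) : Nat) := by
  intro k
  induction k using Nat.strong_induction_on with
  | _ k ih =>
    intro hkn fuel s hfuel
    obtain ⟨f, rfl⟩ : ∃ f, fuel = f + 1 := ⟨fuel - 1, by omega⟩
    rw [fwQuery]
    by_cases hk0 : k = 0
    · subst hk0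
      rw [if_neg (by norm_num)]
      rw [List.countP_eq_zero.mpr]
      · simp
      · intro v hv
        have := hys v hv
        simp only [decide_eq_true_eq]
        omega
    · rw [if_pos (by exact_mod_cast Nat.pos_of_ne_zero hk0)]
      rw [pyLowbit_natCast k hk0]
      have hle := lbN_le k hk0
      have hpos := lbN_pos k hk0
      have hcast : (k : Int) - (lbN k : Int) = ((k - lbN k : Nat) : Int) := by omega
      rw [hcast, PySem.List.pyGetD_natCast]
      rw [show sums.getD k 0 = ((ys.countP (fun v => decide (((k - lbN k : Nat) : Int) < v ∧ v ≤ (k : Int)))) : Nat) from hg.2 k hk0 hkn]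
      rw [ih (k - lbN k) (by omega) (by omega) f _ (by omega)]
      have hsplit : ys.countP (fun v => decide (v ≤ (k : Int))) =
          ys.countP (fun v => decide (v ≤ ((k - lbN k : Nat) : Int))) +
          ys.countP (fun v => decide (((k - lbN k : Nat) : Int) < v ∧ v ≤ (k : Int))) := by
        apply countP_or_split
        intro x hx
        constructor
        · by_cases h1 : x ≤ ((k - lbN k : Nat) : Int) <;>
            by_cases h2 : x ≤ (k : Int) <;>
            simp [h1, h2] <;> omega
        · rintro ⟨ha, hb⟩
          simp only [decide_eq_true_eq] at ha hb
          omega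
      rw [hsplit]
      push_cast
      ring

lemma update_good (n : Nat) (ys sums : List Int) (num : Int) (hg : GoodT n ys sums)
    (h1 : 1 ≤ num) (h2 : num ≤ (n : Int)) :
    GoodT n (ys ++ [num]) (fwUpdate sums.length sums num 1) := by
  obtain ⟨hlen, hcells⟩ := hg
  have hm : num = ((num.toNat : Nat) : Int) := by omega
  constructor
  · rw [fwUpdate_length, hlen]
  · intro j hj0 hjn
    have hjlen : j < sums.length := by omega
    rw [hm, fwUpdate_getD 1 sums.length sums num.toNat (by omega) (by omega) j hjlen]
    rw [hcells j hj0 hjn, List.countP_append]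
    by_cases hc : num.toNat ≤ j ∧ j - lbN j < num.toNat
    · rw [if_pos hc]
      rw [show (List.countP (fun v => decide (((j - lbN j : Nat) : Int) < v ∧ v ≤ (j : Int)))
            [((num.toNat : Nat) : Int)]) = 1 from by
        rw [List.countP_cons, List.countP_nil,
          if_pos (by simp only [decide_eq_true_eq]; omega)]]
      push_cast
      ring
    · rw [if_neg hc]
      rw [show (List.countP (fun v => decide (((j - lbN j : Nat) : Int) < v ∧ v ≤ (j : Int)))
            [((num.toNat : Nat) : Int)]) = 0 from by
        rw [List.countP_cons, List.countP_nil,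
          if_neg (by simp only [decide_eq_true_eq]; omega)]]
      push_cast
      ring

-- both loop bodies compute the reference step below
def refStep (st : List Int × Int) (num : Int) : List Int × Int :=
  (st.1 ++ [num],
   (st.2 + min ((st.1.countP (fun v => decide (v < num)) : Nat) : Int)
       ((st.1.length : Int) - ((st.1.countP (fun v => decide (v ≤ num))) : Nat))) % (10 ^ 9 + 7))

lemma alt_eq_ref (xs : List Int) :
    ∀ (vals ys : List Int) (ans : Int), vals.Perm ys →
    (xs.foldl stepB (vals, ans)).2 = (xs.foldl refStep (ys, ans)).2 := by
  induction xs with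
  | nil => intro vals ys ans h; rfl
  | cons x xs ih =>
      intro vals ys ans h
      have hperm : (vals.orderedInsert (· ≤ ·) x).Perm (ys ++ [x]) :=
        ((List.perm_orderedInsert _ x vals).trans (h.cons x)).trans
          (List.perm_append_singleton x ys).symm
      simp only [List.foldl_cons]
      rw [show stepB (vals, ans) x = ((vals.orderedInsert (· ≤ ·) x),
            (ans + min ((vals.countP (fun v => decide (v < x)) : Nat) : Int)
              ((vals.length : Int) - ((vals.countP (fun v => decide (v ≤ x))) : Nat))) % (10 ^ 9 + 7)) from rfl]
      rw [show refStep (ys, ans) x = (ys ++ [x],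
            (ans + min ((ys.countP (fun v => decide (v < x)) : Nat) : Int)
              ((ys.length : Int) - ((ys.countP (fun v => decide (v ≤ x))) : Nat))) % (10 ^ 9 + 7)) from rfl]
      rw [h.countP_eq, h.countP_eq, h.length_eq]
      exact ih _ _ _ hperm

lemma a_fold (n : Nat) (xs : List Int) :
    ∀ (ys sums : List Int) (ans : Int),
    (∀ v ∈ ys, 1 ≤ v) → (∀ v ∈ xs, 1 ≤ v ∧ v ≤ (n : Int)) → GoodT n ys sums →
    ((PySem.List.enumerate xs (ys.length : Int)).foldl stepA (sums, ans)).2 =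
      (xs.foldl refStep (ys, ans)).2 := by
  induction xs with
  | nil =>
      intro ys sums ans hys hxs hg
      rw [PySem.List.enumerate_nil]
      rfl
  | cons x xs ih =>
      intro ys sums ans hys hxs hg
      obtain ⟨hx1, hxn⟩ := hxs x (by simp)
      rw [PySem.List.enumerate_cons, List.foldl_cons, List.foldl_cons]
      have hk1c : x - 1 = (((x - 1).toNat : Nat) : Int) := by omega
      have hk2c : x = ((x.toNat : Nat) : Int) := by omega
      have hq1 : fwQuery ((x - 1).toNat + 1) sums (x - 1) 0 =
          0 + ((ys.countP (fun v => decide (v ≤ (((x - 1).toNat : Nat) : Int)))) : Nat) := by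
        rw [hk1c]
        exact query_spec n ys sums hys hg (x - 1).toNat (by omega) _ 0 (by omega)
      have hq2 : fwQuery (x.toNat + 1) sums x 0 =
          0 + ((ys.countP (fun v => decide (v ≤ ((x.toNat : Nat) : Int)))) : Nat) := by
        rw [hk2c]
        exact query_spec n ys sums hys hg x.toNat (by omega) _ 0 (by omega)
      have hcnt1 : ys.countP (fun v => decide (v ≤ (((x - 1).toNat : Nat) : Int))) =
          ys.countP (fun v => decide (v < x)) := by
        apply List.countP_congr
        intro v hv
        simp only [decide_eq_true_eq]
        omega
      have hcnt2 : ys.countP (fun v => decide (v ≤ ((x.toNat : Nat) : Int))) =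
          ys.countP (fun v => decide (v ≤ x)) := by
        apply List.countP_congr
        intro v hv
        simp only [decide_eq_true_eq]
        omega
      have hstep : stepA (sums, ans) ((ys.length : Int), x) =
          (fwUpdate sums.length sums x 1,
           (ans + min ((ys.countP (fun v => decide (v < x)) : Nat) : Int)
             ((ys.length : Int) - ((ys.countP (fun v => decide (v ≤ x))) : Nat))) % (10 ^ 9 + 7)) := by
        show (fwUpdate sums.length sums x 1,
           (ans + min (fwQuery ((x - 1).toNat + 1) sums (x - 1) 0)
             ((ys.length : Int) - fwQuery (x.toNat + 1) sums x 0)) % (10 ^ 9 + 7)) = _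
        rw [hq1, hq2, hcnt1, hcnt2]
        norm_num
      rw [hstep]
      have hrefstep : refStep (ys, ans) x =
          (ys ++ [x],
           (ans + min ((ys.countP (fun v => decide (v < x)) : Nat) : Int)
             ((ys.length : Int) - ((ys.countP (fun v => decide (v ≤ x))) : Nat))) % (10 ^ 9 + 7)) := rfl
      rw [hrefstep]
      have hlensucc : (ys.length : Int) + 1 = (((ys ++ [x]).length : Nat) : Int) := by
        rw [List.length_append, List.length_cons, List.length_nil]
        push_cast
        ring
      rw [hlensucc]
      exact ih (ys ++ [x]) _ _
        (by intro v hv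
            rcases List.mem_append.mp hv with h | h
            · exact hys v h
            · simp at h; omega)
        (fun v hv => hxs v (by simp [hv]))
        (update_good n ys sums x ⟨hg.1, hg.2⟩ hx1 hxn)

-- ===== VERDICT (by name: the statement is the Claim_ definition above) =====
theorem createSortedArray_spec : Claim_equal_createSortedArray := by
  intro instructions _ hpre
  obtain ⟨hne, hpos⟩ := hpre
  show createSortedArray instructions = createSortedArray_alt instructions
  obtain ⟨mx, hmx⟩ : ∃ mx, PySem.List.max? instructions (fun x => x) = some mx := by
    cases h : PySem.List.max? instructions (fun x => x) with
    | none => exact absurd ((PySem.List.max?_eq_none_iff _ _).mp h) hne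
    | some m => exact ⟨m, rfl⟩
  have hmem := PySem.List.max?_mem hmx
  have hmax : ∀ y ∈ instructions, y ≤ mx := PySem.List.max?_isMax hmx
  have hmx1 : (1 : Int) ≤ mx := hpos mx hmem
  have htn : (mx + 1).toNat = mx.toNat + 1 := by omega
  have hform : createSortedArray instructions =
      ((PySem.List.enumerate instructions).foldl stepA
        (List.replicate (mx.toNat + 1) 0, 0)).2 := by
    unfold createSortedArray
    rw [hmx]
    show ((PySem.List.enumerate instructions).foldl stepA
      (List.replicate ((mx + 1).toNat) 0, 0)).2 = _
    rw [htn]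
  rw [hform]
  have hg0 : GoodT mx.toNat [] (List.replicate (mx.toNat + 1) 0) := by
    constructor
    · exact List.length_replicate
    · intro j hj0 hjn
      rw [List.getD_replicate 0 (by omega), List.countP_nil]
      rfl
  have hA := a_fold mx.toNat instructions [] (List.replicate (mx.toNat + 1) 0) 0
    (by intro v hv; simp at hv)
    (by intro v hv
        refine ⟨hpos v hv, ?_⟩
        have := hmax v hv
        omega)
    hg0
  rw [show ((([] : List Int).length : Nat) : Int) = 0 from rfl] at hA
  rw [hA]
  exact (alt_eq_ref instructions [] [] 0 (List.Perm.refl _)).symm
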